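-- pv_equiv track=rewrite | github.com/fatihbozdag/tamga | src/bitig/forensic/char_ngrams.py | _iter_ngrams_with_context
-- ===== SOURCE A (Python) =====
-- from collections.abc import Iterable
--
-- def _iter_ngrams_with_context(text: str, n: int) -> Iterable[tuple[str, str, str]]:
--     """Yield (ngram, left_char, right_char) for every n-gram window in ``text``."""
--     if len(text) < n:
--         return
--     for i in range(len(text) - n + 1):
--         ngram = text[i : i + n]
--         left = text[i - 1] if i > 0 else ""
--         right = text[i + n] if i + n < len(text) else ""
--         yield ngram, left, right
-- ===== SOURCE B (Python) =====
-- def _iter_ngrams_with_context(text, n):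
--     """Yield (ngram, left_char, right_char) for every n-gram window in ``text``."""
--     if len(text) < n:
--         return
--     window, left = text[:n], ""
--     for c in text[n:]:
--         yield window, left, c
--         ext = window + c
--         left, window = ext[0], ext[1:]
--     yield window, left, ""
-- ===== Notes on version B (the rewrite author's own statement) =====
-- stated objective: alternative
-- what changed: Replaced the index loop with per-window slicing and left/right boundary branches by a single forward pass that maintains a sliding window and the previous character as state, shifting the window one character at a time and emitting the trailing window with an empty right context at the end.
import Mathlib
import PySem

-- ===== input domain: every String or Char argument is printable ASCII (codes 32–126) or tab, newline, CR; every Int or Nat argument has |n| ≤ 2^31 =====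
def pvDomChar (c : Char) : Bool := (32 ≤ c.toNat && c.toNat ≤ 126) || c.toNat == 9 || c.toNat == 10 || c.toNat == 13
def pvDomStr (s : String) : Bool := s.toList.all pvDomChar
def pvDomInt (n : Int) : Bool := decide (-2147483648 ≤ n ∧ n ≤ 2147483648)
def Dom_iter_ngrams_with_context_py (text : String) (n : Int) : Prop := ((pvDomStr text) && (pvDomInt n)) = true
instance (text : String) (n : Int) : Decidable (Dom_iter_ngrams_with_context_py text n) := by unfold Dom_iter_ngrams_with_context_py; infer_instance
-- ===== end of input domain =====

-- B replaces A's index loop (per-index slices, left/right boundary branches) by a single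
-- forward pass maintaining a sliding window and the previous character as state;
-- alternative decomposition, same cost. Pre_ excludes n < 0, where A raises IndexError.


-- ===== PORT A =====
def iter_ngrams_with_context_py (text : String) (n : Int) : List (String × String × String) :=
  let s := text.toList
  if (s.length : Int) < n then []
  else
    (PySem.List.pyRange 0 ((s.length : Int) - n + 1) 1).foldl (fun acc i =>
      let ngram := String.ofList (PySem.List.slice s (some i) (some (i + n)))
      let left := if 0 < i then
          String.ofList ((PySem.List.pyGet? s (i - 1)).elim [] (fun c => [c]))
        else ""
      let right := if i + n < (s.length : Int) then
          String.ofList ((PySem.List.pyGet? s (i + n)).elim [] (fun c => [c]))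
        else ""
      acc ++ [(ngram, left, right)]) []

-- ===== PORT B =====
-- the for-loop of Source B: state = (window, left); one yielded tuple per consumed char,
-- plus the final (window, left, "") after the loop.
def pvAltLoop (window : List Char) (left : String) : List Char → List (String × String × String)
  | [] => [(String.ofList window, left, "")]
  | c :: cs =>
    (String.ofList window, left, String.ofList [c]) ::
      (match window ++ [c] with
       | [] => []     -- unreachable: window ++ [c] is nonempty
       | h :: t => pvAltLoop t (String.ofList [h]) cs)

def iter_ngrams_with_context_py_alt (text : String) (n : Int) : List (String × String × String) :=
  let s := text.toList
  if (s.length : Int) < n then []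
  else
    pvAltLoop (PySem.List.slice s none (some n)) "" (PySem.List.slice s (some n) none)

-- ===== PRECONDITION & SPEC =====
-- Pre_ excludes exactly n < 0, on which A always raises IndexError (the left- or
-- right-context index runs outside the string before the loop finishes).
def Pre_iter_ngrams_with_context_py (text : String) (n : Int) : Prop := 0 ≤ n
instance (text : String) (n : Int) : Decidable (Pre_iter_ngrams_with_context_py text n) := by unfold Pre_iter_ngrams_with_context_py; infer_instance
def pvWitness_iter_ngrams_with_context_py : String × Int := ("abcd", 2)

def Spec_iter_ngrams_with_context_py (text : String) (n : Int) (out : List (String × String × String)) : Prop := out = iter_ngrams_with_context_py_alt text n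
instance (text : String) (n : Int) (out : List (String × String × String)) : Decidable (Spec_iter_ngrams_with_context_py text n out) := by unfold Spec_iter_ngrams_with_context_py; infer_instance

-- ===== CLAIM (what is proved, stated in full; the proofs are below) =====
def Claim_equal_iter_ngrams_with_context_py : Prop := ∀ (text : String) (n : Int), Dom_iter_ngrams_with_context_py text n → Pre_iter_ngrams_with_context_py text n → Spec_iter_ngrams_with_context_py text n (iter_ngrams_with_context_py text n)

-- ===== LEMMAS AND PROOFS =====

-- the tuple yielded at window start j (for an n-gram length nn ≤ s.length)
def pvTup (s : List Char) (nn j : Nat) : String × String × String :=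
  (String.ofList ((s.drop j).take nn),
   if j = 0 then "" else String.ofList ((s.drop (j - 1)).take 1),
   String.ofList ((s.drop (j + nn)).take 1))

lemma pv_drop_last_take (pre rest : List Char) (h : pre ≠ []) :
    ((pre ++ rest).drop (pre.length - 1)).take 1 = pre.drop (pre.length - 1) := by
  induction pre with
  | nil => exact absurd rfl h
  | cons a tl ih =>
    cases tl with
    | nil => simp
    | cons b tl' => simpa using ih (by simp)

lemma pvTup_head (pre window r : List Char) :
    pvTup (pre ++ window ++ r) window.length pre.length
      = (String.ofList window,
         String.ofList (pre.drop (pre.length - 1)),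
         String.ofList (r.take 1)) := by
  unfold pvTup
  refine Prod.ext ?_ (Prod.ext ?_ ?_)
  · simp [List.append_assoc]
  · rcases eq_or_ne pre ([] : List Char) with hpre | hpre
    · subst hpre; simp
    · have hlen : pre.length ≠ 0 := by simpa [List.length_eq_zero_iff] using hpre
      rw [if_neg hlen, List.append_assoc, pv_drop_last_take pre (window ++ r) hpre]
  · have : (pre.length + window.length) = (pre ++ window).length := by simp
    rw [this, List.drop_left]

lemma pvAltLoop_eq (r : List Char) : ∀ (pre window : List Char),
    pvAltLoop window (String.ofList (pre.drop (pre.length - 1))) r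
      = (List.range (r.length + 1)).map
          (fun k => pvTup (pre ++ window ++ r) window.length (pre.length + k)) := by
  induction r with
  | nil =>
    intro pre window
    simp only [pvAltLoop, List.length_nil, Nat.zero_add, List.range_one, List.map,
      Nat.add_zero]
    rw [pvTup_head pre window []]
    rfl
  | cons c cs ih =>
    intro pre window
    obtain ⟨h, t, heq⟩ : ∃ h t, window ++ [c] = h :: t := by
      cases hw : window ++ [c] with
      | nil => exact absurd hw (by simp)
      | cons x xs => exact ⟨x, xs, rfl⟩
    have hlen_t : t.length = window.length := by
      have := congrArg List.length heq
      simpa using this.symm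
    have hs : (pre ++ [h]) ++ t ++ cs = pre ++ window ++ (c :: cs) := by
      have h1 : ([h] ++ t : List Char) = window ++ [c] := by simp [heq]
      calc (pre ++ [h]) ++ t ++ cs = pre ++ ([h] ++ t) ++ cs := by simp
        _ = pre ++ (window ++ [c]) ++ cs := by rw [h1]
        _ = pre ++ window ++ (c :: cs) := by simp
    have hIH := ih (pre ++ [h]) t
    have hLnew : String.ofList ((pre ++ [h]).drop ((pre ++ [h]).length - 1))
        = String.ofList [h] := by simp
    rw [hLnew] at hIH
    have hp1 : (pre ++ [h]).length = pre.length + 1 := by simp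
    rw [hs, hlen_t, hp1] at hIH
    simp only [pvAltLoop, heq]
    rw [hIH]
    have hrange : List.range (cs.length + 1 + 1)
        = 0 :: (List.range (cs.length + 1)).map Nat.succ := List.range_succ_eq_map
    simp only [List.length_cons]
    rw [hrange, List.map_cons, List.map_map]
    congr 1
    · rw [Nat.add_zero, pvTup_head pre window (c :: cs)]
      rfl
    · refine List.map_congr_left (fun k _ => ?_)
      simp only [Function.comp_apply]
      congr 1
      omega

-- A's output, characterised as a map of pvTup
lemma pvA_eq (s : List Char) (nn : Nat) (hle : nn ≤ s.length) :
    iter_ngrams_with_context_py (String.ofList s) (nn : Int)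
      = (List.range (s.length - nn + 1)).map (fun k => pvTup s nn k) := by
  unfold iter_ngrams_with_context_py
  simp only [String.toList_ofList]
  have hnot : ¬ ((s.length : Int) < (nn : Int)) := by exact_mod_cast not_lt.mpr hle
  rw [if_neg hnot, PySem.List.foldl_append_singleton_eq_map, PySem.List.pyRange_one]
  have hcast : (((s.length : Int) - (nn : Int) + 1) - 0).toNat = s.length - nn + 1 := by omega
  rw [hcast, List.map_map]
  refine List.map_congr_left (fun k hk => ?_)
  have hkm : k < s.length - nn + 1 := List.mem_range.mp hk
  simp only [Function.comp_apply, Int.zero_add]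
  unfold pvTup
  refine Prod.ext ?_ (Prod.ext ?_ ?_)
  · have hcast2 : ((k : Int) + (nn : Int)) = ((k + nn : Nat) : Int) := by push_cast; ring
    rw [hcast2, PySem.List.slice_natCast]
    have : k + nn - k = nn := by omega
    rw [this]
  · cases k with
    | zero => simp
    | succ j =>
      have hj : j < s.length := by omega
      have hpos : (0 : Int) < ((j + 1 : Nat) : Int) := by positivity
      rw [if_pos hpos, if_neg (Nat.succ_ne_zero j)]
      have hcast3 : (((j + 1 : Nat) : Int) - 1) = ((j : Nat) : Int) := by push_cast; ring
      rw [hcast3, PySem.List.pyGet?_natCast, List.getElem?_eq_getElem hj]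
      simp only [Nat.add_sub_cancel]
      rw [List.drop_eq_getElem_cons hj]
      rfl
  · by_cases hk2 : k + nn < s.length
    · have hc : ((k : Int) + (nn : Int)) < ((s.length : Nat) : Int) := by exact_mod_cast hk2
      rw [if_pos hc]
      have hcast2 : ((k : Int) + (nn : Int)) = ((k + nn : Nat) : Int) := by push_cast; ring
      rw [hcast2, PySem.List.pyGet?_natCast, List.getElem?_eq_getElem hk2,
        List.drop_eq_getElem_cons hk2]
      rfl
    · have hc : ¬ (((k : Int) + (nn : Int)) < ((s.length : Nat) : Int)) := by exact_mod_cast hk2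
      rw [if_neg hc, List.drop_eq_nil_of_le (Nat.le_of_not_lt hk2)]
      rfl

-- B's output, characterised the same way
lemma pvB_eq (s : List Char) (nn : Nat) (hle : nn ≤ s.length) :
    iter_ngrams_with_context_py_alt (String.ofList s) (nn : Int)
      = (List.range (s.length - nn + 1)).map (fun k => pvTup s nn k) := by
  unfold iter_ngrams_with_context_py_alt
  simp only [String.toList_ofList]
  have hnot : ¬ ((s.length : Int) < (nn : Int)) := by exact_mod_cast not_lt.mpr hle
  rw [if_neg hnot, PySem.List.slice_to_natCast, PySem.List.slice_from_natCast]
  have h0 : ("" : String) = String.ofList (([] : List Char).drop (([] : List Char).length - 1)) := rfl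
  rw [h0, pvAltLoop_eq (s.drop nn) [] (s.take nn)]
  simp only [List.nil_append, List.take_append_drop, List.length_take, List.length_drop,
    List.length_nil, Nat.zero_add, Nat.min_eq_left hle]

-- ===== VERDICT (by name: the statement is the Claim_ definition above) =====
theorem iter_ngrams_with_context_py_spec : Claim_equal_iter_ngrams_with_context_py := by
  intro text n _ hn
  obtain ⟨nn, rfl⟩ : ∃ m : Nat, n = (m : Int) := ⟨n.toNat, (Int.toNat_of_nonneg hn).symm⟩
  unfold Spec_iter_ngrams_with_context_py
  obtain ⟨s, rfl⟩ : ∃ s : List Char, text = String.ofList s :=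
    ⟨text.toList, String.ofList_toList.symm⟩
  by_cases h : nn ≤ s.length
  · rw [pvA_eq s nn h, pvB_eq s nn h]
  · have hlt : (((String.ofList s).toList.length : Int) < (nn : Int)) := by
      rw [String.toList_ofList]; exact_mod_cast Nat.lt_of_not_le h
    unfold iter_ngrams_with_context_py iter_ngrams_with_context_py_alt
    simp only [hlt, if_pos]
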